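-- pv_equiv track=rewrite | github.com/makimaki1006/kaigo-bi-platform | scripts/team_comparison_targeted.py | vtt_to_text
-- ===== SOURCE A (Python) =====
-- def vtt_to_text(vtt):
--     lines = vtt.strip().split("\n")
--     result = []
--     i = 0
--     while i < len(lines):
--         line = lines[i].strip()
--         if "-->" in line:
--             ts = line.split("-->")[0].strip()
--             tl = []
--             i += 1
--             while i < len(lines) and lines[i].strip() and "-->" not in lines[i]:
--                 tl.append(lines[i].strip())
--                 i += 1
--             if tl:
--                 result.append(f"[{ts}] {' '.join(tl)}")
--             continue
--         i += 1
--     return "\n".join(result)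
-- ===== SOURCE B (Python) =====
-- def vtt_to_text(vtt):
--     def flush(ts, tl, result):
--         if ts is not None and tl:
--             result.append(f"[{ts}] {' '.join(tl)}")
--
--     result = []
--     ts = None
--     tl = []
--     for line in vtt.strip().split("\n"):
--         s = line.strip()
--         if "-->" in s:
--             flush(ts, tl, result)
--             ts = s.split("-->")[0].strip()
--             tl = []
--         elif s:
--             if ts is not None:
--                 tl.append(s)
--         else:
--             flush(ts, tl, result)
--             ts = None
--             tl = []
--     flush(ts, tl, result)
--     return "\n".join(result)
-- ===== Notes on version B (the rewrite author's own statement) =====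
-- stated objective: simpler
-- what changed: Replaced the nested index-advancing while-loops with a single flat for-loop over the lines that maintains a current-timestamp/pending-text state machine and flushes completed blocks.
import Mathlib
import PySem

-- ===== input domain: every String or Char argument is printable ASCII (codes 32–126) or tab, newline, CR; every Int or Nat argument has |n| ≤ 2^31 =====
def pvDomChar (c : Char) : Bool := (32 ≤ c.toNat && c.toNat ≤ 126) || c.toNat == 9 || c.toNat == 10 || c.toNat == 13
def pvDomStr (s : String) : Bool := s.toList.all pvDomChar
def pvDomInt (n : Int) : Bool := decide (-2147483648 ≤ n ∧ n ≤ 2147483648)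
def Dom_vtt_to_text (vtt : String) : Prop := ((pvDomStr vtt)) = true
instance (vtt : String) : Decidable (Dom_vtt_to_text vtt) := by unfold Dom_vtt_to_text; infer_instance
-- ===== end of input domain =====

-- B replaces A's nested index-advancing while-loops by one flat pass with a (timestamp, pending-lines) state machine; same return value, simpler control flow.

-- ===== PORT A =====
-- shared by both ports (both Pythons contain this exact expression):
-- f"[{ts}] {' '.join(tl)}"
def pvBlock (ts : String) (tl : List String) : String :=
  "[" ++ ts ++ "] " ++ PySem.Str.join " " tl

-- line.split("-->")[0].strip(); split on the nonempty separator "-->" always yields a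
-- nonempty list, so getD []/headD "" are exact (never hit their defaults)
def pvTs (s : String) : String :=
  PySem.Str.strip (((PySem.Str.split? s "-->").getD []).headD "")

-- A's inner while: collects stripped nonblank non-'-->' lines, returns (tl, remaining lines)
def vttInner : List String → List String × List String
  | [] => ([], [])
  | l :: rest =>
    if PySem.Str.strip l ≠ "" ∧ PySem.Str.isIn "-->" l = false then
      ((PySem.Str.strip l) :: (vttInner rest).1, (vttInner rest).2)
    else ([], l :: rest)

theorem vttInner_len (ls : List String) : (vttInner ls).2.length ≤ ls.length := by
  induction ls with
  | nil => simp [vttInner]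
  | cons l rest ih =>
    simp only [vttInner]
    split
    · simpa using Nat.le_succ_of_le ih
    · simp

-- A's outer while over the list of lines
def vttOuter : List String → List String
  | [] => []
  | l :: rest =>
    if PySem.Str.isIn "-->" (PySem.Str.strip l) then
      (if (vttInner rest).1 ≠ [] then
        [pvBlock (pvTs (PySem.Str.strip l)) (vttInner rest).1] else [])
        ++ vttOuter (vttInner rest).2
    else vttOuter rest
termination_by ls => ls.length
decreasing_by
  · exact Nat.lt_succ_of_le (vttInner_len rest)
  · simp

def vtt_to_text (vtt : String) : String :=
  PySem.Str.join "\n" (vttOuter ((PySem.Str.split? (PySem.Str.strip vtt) "\n").getD []))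

-- ===== PORT B =====
-- flush(ts, tl, result)
def vttFlush (ts? : Option String) (tl out : List String) : List String :=
  match ts? with
  | some ts => if tl ≠ [] then out ++ [pvBlock ts tl] else out
  | none => out

-- the body of B's single for-loop; state = (ts, tl, result)
def vttStep (st : Option String × List String × List String) (line : String) :
    Option String × List String × List String :=
  if PySem.Str.isIn "-->" (PySem.Str.strip line) then
    (some (pvTs (PySem.Str.strip line)), [], vttFlush st.1 st.2.1 st.2.2)
  else if PySem.Str.strip line ≠ "" then
    match st.1 with
    | some ts => (some ts, st.2.1 ++ [PySem.Str.strip line], st.2.2)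
    | none => st
  else
    (none, [], vttFlush st.1 st.2.1 st.2.2)

-- final state: flush the pending block, then join the collected result lines
def vttFinish (st : Option String × List String × List String) : List String :=
  vttFlush st.1 st.2.1 st.2.2

def vtt_to_text_alt (vtt : String) : String :=
  PySem.Str.join "\n"
    (vttFinish (((PySem.Str.split? (PySem.Str.strip vtt) "\n").getD []).foldl vttStep (none, [], [])))

-- ===== PRECONDITION & SPEC =====
def Spec_vtt_to_text (vtt : String) (out : String) : Prop := out = vtt_to_text_alt vtt
instance (vtt : String) (out : String) : Decidable (Spec_vtt_to_text vtt out) := by unfold Spec_vtt_to_text; infer_instance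

-- ===== CLAIM (what is proved, stated in full; the proofs are below) =====
def Claim_equal_vtt_to_text : Prop := ∀ (vtt : String), Dom_vtt_to_text vtt → Spec_vtt_to_text vtt (vtt_to_text vtt)

-- ===== LEMMAS AND PROOFS =====

-- '-->' contains no whitespace, so stripping a line neither creates nor destroys an occurrence
theorem infix_dropWhile_iff {p : Char → Bool} {h : Char} (t s : List Char)
    (hp : p h = false) : (h :: t) <:+: s.dropWhile p ↔ (h :: t) <:+: s := by
  constructor
  · intro hin
    exact hin.trans (s.dropWhile_suffix p).isInfix
  · intro hin
    induction s with
    | nil => simp at hin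
    | cons x xs ih =>
      by_cases hx : p x = true
      · rw [List.dropWhile_cons_of_pos hx]
        rcases hin with ⟨a, b, hab⟩
        cases a with
        | nil =>
          exfalso
          simp only [List.nil_append] at hab
          have hx' : h = x := by
            have := congrArg (·.head?) hab
            simpa using this
          rw [← hx'] at hx
          simp [hp] at hx
        | cons y a' =>
          apply ih
          exact ⟨a', b, by simpa using congrArg List.tail hab⟩
      · rw [List.dropWhile_cons_of_neg hx]
        exact hin

theorem infix_reverse_iff (X Y : List Char) : X <:+: Y.reverse ↔ X.reverse <:+: Y := by
  rw [← List.reverse_infix (l₁ := X.reverse), List.reverse_reverse]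

theorem isIn_arrow_strip (l : String) :
    PySem.Str.isIn "-->" (PySem.Str.strip l) = PySem.Str.isIn "-->" l := by
  rw [Bool.eq_iff_iff]
  have harrow : ("-->".toList : List Char) = ['-', '-', '>'] := by decide
  rw [PySem.Str.isIn_iff_infix, PySem.Str.isIn_iff_infix, PySem.Str.toList_strip]
  rw [harrow]
  unfold PySem.Chars.strip PySem.Chars.rstrip PySem.Chars.lstrip
  have hr1 : (['-', '-', '>'] : List Char).reverse = ['>', '-', '-'] := by decide
  have hr2 : (['>', '-', '-'] : List Char).reverse = ['-', '-', '>'] := by decide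
  calc ['-', '-', '>'] <:+: ((l.toList.dropWhile PySem.Chars.isspace).reverse.dropWhile PySem.Chars.isspace).reverse
      ↔ ['>', '-', '-'] <:+: (l.toList.dropWhile PySem.Chars.isspace).reverse.dropWhile PySem.Chars.isspace := by
        rw [infix_reverse_iff, hr1]
    _ ↔ ['>', '-', '-'] <:+: (l.toList.dropWhile PySem.Chars.isspace).reverse :=
        infix_dropWhile_iff _ _ (by decide)
    _ ↔ ['-', '-', '>'] <:+: l.toList.dropWhile PySem.Chars.isspace := by
        rw [infix_reverse_iff, hr2]
    _ ↔ ['-', '-', '>'] <:+: l.toList := infix_dropWhile_iff _ _ (by decide)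

theorem vttFlush_none (tl out : List String) : vttFlush none tl out = out := rfl

theorem vttFlush_some (ts : String) (tl out : List String) :
    vttFlush (some ts) tl out = out ++ (if tl ≠ [] then [pvBlock ts tl] else []) := by
  unfold vttFlush
  by_cases h : tl = [] <;> simp [h]

theorem vttRun (ls : List String) :
    (∀ out, vttFinish (ls.foldl vttStep (none, [], out)) = out ++ vttOuter ls) ∧
    (∀ ts tl out, vttFinish (ls.foldl vttStep (some ts, tl, out))
      = vttFlush (some ts) (tl ++ (vttInner ls).1) out ++ vttOuter (vttInner ls).2) := by
  induction ls with
  | nil => simp [vttOuter, vttInner, vttFlush, vttFinish]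
  | cons l rest ih =>
    constructor
    · intro out
      rw [vttOuter]
      by_cases harr : PySem.Str.isIn "-->" (PySem.Str.strip l) = true
      · simp only [List.foldl_cons, vttStep, if_pos harr, vttFlush_none]
        rw [ih.2, vttFlush_some]
        simp
      · by_cases hblank : PySem.Str.strip l ≠ ""
        · simp only [List.foldl_cons, vttStep, if_neg harr, if_pos hblank]
          exact ih.1 out
        · simp only [List.foldl_cons, vttStep, if_neg harr, if_neg hblank, vttFlush_none]
          exact ih.1 out
    · intro ts tl out
      rw [vttInner]
      by_cases harr : PySem.Str.isIn "-->" (PySem.Str.strip l) = true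
      · have harr' : PySem.Str.isIn "-->" l = true := by rw [← isIn_arrow_strip]; exact harr
        rw [if_neg (by simp_all)]
        simp only [List.foldl_cons, vttStep, if_pos harr]
        rw [ih.2]
        rw [vttOuter]
        simp only [if_pos harr]
        simp [vttFlush_some]
      · have harr' : PySem.Str.isIn "-->" l = false := by
          rw [← isIn_arrow_strip]; simpa using harr
        by_cases hblank : PySem.Str.strip l ≠ ""
        · rw [if_pos (by simp_all)]
          simp only [List.foldl_cons, vttStep, if_neg harr, if_pos hblank]
          rw [ih.2]
          simp [vttFlush_some]
        · rw [if_neg (by simp_all)]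
          have hb : PySem.Str.strip l = "" := not_not.mp hblank
          simp only [List.foldl_cons, vttStep, if_neg harr, if_neg hblank]
          rw [ih.1]
          rw [vttOuter]
          simp only [if_neg harr]
          simp [vttFlush_some]

-- ===== VERDICT (by name: the statement is the Claim_ definition above) =====
theorem vtt_to_text_spec : Claim_equal_vtt_to_text := by
  intro vtt _
  unfold Spec_vtt_to_text vtt_to_text vtt_to_text_alt
  rw [(vttRun _).1]
  simp
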